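-- pv_equiv track=rewrite | github.com/Yoon-men/CodingTest | BaekJoon/1744.py | joyGo
-- ===== SOURCE A (Python) =====
-- def joyGo(N: int, Li: list) -> int :
--     ans = 0
--     p_list, m_list = [], []
--
--     for i in Li :
--         if i == 1 : ans += 1
--         elif i > 1 : p_list.append(i)
--         else : m_list.append(i)
--     p_list.sort(reverse=True)
--     m_list.sort()
--
--     for i in range(0, len(p_list), 2) :
--         ans += p_list[i] if i == len(p_list)-1 else p_list[i]*p_list[i+1]
--     for i in range(0, len(m_list), 2) :
--         ans += m_list[i] if i == len(m_list)-1 else m_list[i]*m_list[i+1]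
--
--     return ans
-- ===== SOURCE B (Python) =====
-- def joyGo(N: int, Li: list) -> int:
--     def pair_sum(lst):
--         total = 0
--         it = iter(lst)
--         for a in it:
--             b = next(it, None)
--             total += a if b is None else max(a * b, a + b)
--         return total
--
--     pos = sorted((x for x in Li if x >= 1), reverse=True)
--     nonpos = sorted(x for x in Li if x <= 0)
--     return pair_sum(pos) + pair_sum(nonpos)
-- ===== Notes on version B (the rewrite author's own statement) =====
-- stated objective: simpler
-- what changed: B folds the special-casing of 1 away: it partitions into positives (1s included) sorted descending and nonpositives sorted ascending, and sums max(a*b, a+b) over adjacent pairs of each list (leftover element added as is), replacing A's separate ones-counter and its index loop with a conditional on i == len-1 by a single uniform pairing rule.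
import Mathlib
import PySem

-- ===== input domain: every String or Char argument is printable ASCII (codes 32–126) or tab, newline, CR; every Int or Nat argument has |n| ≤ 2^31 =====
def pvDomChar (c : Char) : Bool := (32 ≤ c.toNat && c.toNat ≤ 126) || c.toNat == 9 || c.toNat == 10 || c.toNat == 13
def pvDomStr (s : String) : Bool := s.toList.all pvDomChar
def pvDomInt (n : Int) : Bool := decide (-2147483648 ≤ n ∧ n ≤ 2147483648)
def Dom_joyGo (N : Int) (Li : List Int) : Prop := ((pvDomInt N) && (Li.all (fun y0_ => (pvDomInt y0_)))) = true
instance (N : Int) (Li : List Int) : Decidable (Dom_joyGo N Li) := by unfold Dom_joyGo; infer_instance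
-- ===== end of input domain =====

-- B replaces A's separate counter for 1s and its three-way branch by one uniform rule:
-- sort positives (1s included) descending and nonpositives ascending, and add
-- max(a*b, a+b) for each adjacent pair (odd leftover added as is). Objective: simpler.

-- ===== PORT A =====
-- the body of A's first for-loop (ans, p_list, m_list as one state triple)
def joyGoStep (s : Int × List Int × List Int) (i : Int) : Int × List Int × List Int :=
  if i = 1 then (s.1 + 1, s.2.1, s.2.2)
  else if 1 < i then (s.1, s.2.1 ++ [i], s.2.2)
  else (s.1, s.2.1, s.2.2 ++ [i])

-- one of A's two identical 'for i in range(0, len(xs), 2)' accumulation loops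
def joyGoLoop (xs : List Int) (acc : Int) : Int :=
  (PySem.List.pyRange 0 (xs.length : Int) 2).foldl
    (fun a i =>
      a + (if i = (xs.length : Int) - 1 then PySem.List.pyGetD xs i 0
           else PySem.List.pyGetD xs i 0 * PySem.List.pyGetD xs (i + 1) 0)) acc

def joyGo (N : Int) (Li : List Int) : Int :=
  let s := Li.foldl joyGoStep (0, [], [])
  let p := PySem.List.sorted s.2.1 (fun x => x) true
  let m := PySem.List.sorted s.2.2 (fun x => x) false
  joyGoLoop m (joyGoLoop p s.1)

-- ===== PORT B =====
-- Source B's pair_sum: walk the list two elements at a time, max(a*b, a+b) per pair, leftover as is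
def pairSum : List Int → Int
  | [] => 0
  | [a] => a
  | a :: b :: t => max (a * b) (a + b) + pairSum t

def joyGo_alt (N : Int) (Li : List Int) : Int :=
  let pos := PySem.List.sorted (Li.filter (fun x => 1 ≤ x)) (fun x => x) true
  let nonpos := PySem.List.sorted (Li.filter (fun x => x ≤ 0)) (fun x => x) false
  pairSum pos + pairSum nonpos

-- ===== PRECONDITION & SPEC =====
def Spec_joyGo (N : Int) (Li : List Int) (out : Int) : Prop := out = joyGo_alt N Li
instance (N : Int) (Li : List Int) (out : Int) : Decidable (Spec_joyGo N Li out) := by unfold Spec_joyGo; infer_instance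

-- ===== CLAIM (what is proved, stated in full; the proofs are below) =====
def Claim_equal_joyGo : Prop := ∀ (N : Int) (Li : List Int), Dom_joyGo N Li → Spec_joyGo N Li (joyGo N Li)

-- ===== LEMMAS AND PROOFS =====

-- A's pairing loop, as a structural recursion: product per adjacent pair, odd leftover as is
def pairProdA : List Int → Int
  | [] => 0
  | [a] => a
  | a :: b :: t => a * b + pairProdA t

-- A's partition loop computes (count of 1s, elements > 1, elements ≤ 0), in order
lemma joyGo_partition (Li : List Int) : ∀ (c : Int) (p m : List Int),
    Li.foldl joyGoStep (c, p, m)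
      = (c + (Li.count 1 : Int), p ++ Li.filter (fun x => 1 < x), m ++ Li.filter (fun x => x ≤ 0)) := by
  induction Li with
  | nil => simp
  | cons i t ih =>
    intro c p m
    simp only [List.foldl_cons, List.count_cons, List.filter_cons, joyGoStep]
    by_cases h1 : i = 1
    · subst h1
      rw [ih]
      norm_num
      push_cast
      ring
    · by_cases h2 : 1 < i
      · have hn0 : ¬ i ≤ 0 := by omega
        simp only [if_pos h2, ih, h1, hn0]
        simp [h1, h2]
      · have hn0 : i ≤ 0 := by omega
        simp only [if_neg h2, ih, h1, hn0]
        simp [h1, h2]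

-- A's range(0, len, 2) index list, in Nat form
lemma pyRange_two (n : Nat) :
    PySem.List.pyRange 0 (n : Int) 2 = (List.range ((n + 1) / 2)).map (fun k => ((2 * k : Nat) : Int)) := by
  rw [PySem.List.pyRange_of_pos 0 (n : Int) (by norm_num)]
  have hcount : (if (0:Int) < (n:Int) then (((n:Int) - 0 + 2 - 1) / 2).toNat else 0) = (n + 1) / 2 := by
    split_ifs with h <;> omega
  rw [hcount]
  exact List.map_congr_left (fun k _ => by push_cast; ring)

-- A's indexed loop equals the structural pair-product recursion
-- core of the loop equivalence, over the Nat index list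
lemma joyGoLoop_core (xs : List Int) : ∀ acc : Int,
    (List.range ((xs.length + 1) / 2)).foldl
      (fun a k => a + (if ((2 * k : Nat) : Int) = (xs.length : Int) - 1 then PySem.List.pyGetD xs ((2 * k : Nat) : Int) 0
           else PySem.List.pyGetD xs ((2 * k : Nat) : Int) 0 * PySem.List.pyGetD xs (((2 * k : Nat) : Int) + 1) 0)) acc
      = acc + pairProdA xs := by
  induction xs using pairProdA.induct with
  | case1 => intro acc; simp [pairProdA]
  | case2 a =>
    intro acc
    norm_num [List.range_succ, pairProdA, PySem.List.pyGetD_natCast]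
  | case3 a b t ih =>
    intro acc
    simp only [List.length_cons]
    rw [show (t.length + 1 + 1 + 1) / 2 = (t.length + 1) / 2 + 1 from by omega,
        List.range_succ_eq_map, List.foldl_cons, List.foldl_map]
    have h0 : ((2 * 0 : Nat) : Int) ≠ ((t.length + 1 + 1 : Nat) : Int) - 1 := by push_cast; omega
    rw [if_neg h0]
    have hstep : ∀ (a' : Int), ∀ k ∈ List.range ((t.length + 1) / 2),
        (a' + (if ((2 * (k + 1) : Nat) : Int) = ((t.length + 1 + 1 : Nat) : Int) - 1 then PySem.List.pyGetD (a :: b :: t) ((2 * (k + 1) : Nat) : Int) 0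
             else PySem.List.pyGetD (a :: b :: t) ((2 * (k + 1) : Nat) : Int) 0 * PySem.List.pyGetD (a :: b :: t) (((2 * (k + 1) : Nat) : Int) + 1) 0))
        = (a' + (if ((2 * k : Nat) : Int) = (t.length : Int) - 1 then PySem.List.pyGetD t ((2 * k : Nat) : Int) 0
             else PySem.List.pyGetD t ((2 * k : Nat) : Int) 0 * PySem.List.pyGetD t (((2 * k : Nat) : Int) + 1) 0)) := by
      intro a' k _
      have hc : (((2 * (k + 1) : Nat) : Int) = ((t.length + 1 + 1 : Nat) : Int) - 1) ↔ (((2 * k : Nat) : Int) = (t.length : Int) - 1) := by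
        push_cast; omega
      have hg1 : PySem.List.pyGetD (a :: b :: t) ((2 * (k + 1) : Nat) : Int) 0 = PySem.List.pyGetD t ((2 * k : Nat) : Int) 0 := by
        rw [PySem.List.pyGetD_natCast, PySem.List.pyGetD_natCast]
        show (a :: b :: t).getD (2 * k + 2) 0 = t.getD (2 * k) 0
        simp [List.getD]
      have hg2 : PySem.List.pyGetD (a :: b :: t) (((2 * (k + 1) : Nat) : Int) + 1) 0 = PySem.List.pyGetD t (((2 * k : Nat) : Int) + 1) 0 := by
        rw [show ((2 * (k + 1) : Nat) : Int) + 1 = ((2 * k + 1 + 2 : Nat) : Int) from by push_cast; ring,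
            show ((2 * k : Nat) : Int) + 1 = ((2 * k + 1 : Nat) : Int) from by push_cast; ring,
            PySem.List.pyGetD_natCast, PySem.List.pyGetD_natCast]
        show (a :: b :: t).getD (2 * k + 1 + 2) 0 = t.getD (2 * k + 1) 0
        simp [List.getD]
      rw [hg1, hg2, if_congr hc rfl rfl]
    simp only [Nat.succ_eq_add_one]
    rw [PySem.List.foldl_congr_mem _ _ _ _ hstep, ih]
    have hga : PySem.List.pyGetD (a :: b :: t) ((2 * 0 : Nat) : Int) 0 = a := by
      rw [PySem.List.pyGetD_natCast]; rfl
    have hgb : PySem.List.pyGetD (a :: b :: t) (((2 * 0 : Nat) : Int) + 1) 0 = b := by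
      rw [show ((2 * 0 : Nat) : Int) + 1 = ((1 : Nat) : Int) from by norm_num, PySem.List.pyGetD_natCast]; rfl
    rw [hga, hgb, pairProdA]
    ring

-- A's indexed loop equals the structural pair-product recursion
lemma joyGoLoop_eq (xs : List Int) : ∀ acc : Int, joyGoLoop xs acc = acc + pairProdA xs := by
  intro acc
  unfold joyGoLoop
  rw [pyRange_two xs.length, List.foldl_map]
  exact joyGoLoop_core xs acc

-- pairSum of k ones is k
lemma pairSum_replicate_one (k : Nat) : pairSum (List.replicate k 1) = (k : Int) := by
  induction k using Nat.twoStepInduction with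
  | zero => rfl
  | one => rfl
  | more k ih _ =>
    rw [List.replicate_succ, List.replicate_succ, pairSum, ih]
    have : max (1 * 1 : Int) (1 + 1) = 2 := by decide
    rw [this]
    push_cast
    ring

-- the 1-folding identity: on a list of elements ≥ 2 followed by k ones,
-- the max-rule pairing equals the product pairing plus k
lemma pairSum_append_ones (q : List Int) (hq : ∀ x ∈ q, 2 ≤ x) :
    ∀ k : Nat, pairSum (q ++ List.replicate k 1) = pairProdA q + (k : Int) := by
  induction q using pairSum.induct with
  | case1 => intro k; simp [pairSum_replicate_one, pairProdA]
  | case2 a =>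
    intro k
    have ha : (2:Int) ≤ a := hq a (by simp)
    match k with
    | 0 => simp [pairSum, pairProdA]
    | k + 1 =>
      rw [List.replicate_succ]
      show pairSum (a :: 1 :: List.replicate k 1) = pairProdA [a] + ((k:Int) + 1)
      rw [pairSum, pairSum_replicate_one, pairProdA]
      have : max (a * 1) (a + 1) = a + 1 := max_eq_right (by omega)
      rw [this]; ring
  | case3 a b t ih =>
    intro k
    have ha : (2:Int) ≤ a := hq a (by simp)
    have hb : (2:Int) ≤ b := hq b (by simp)
    have hmax : max (a * b) (a + b) = a * b := max_eq_left (by nlinarith)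
    show pairSum (a :: b :: (t ++ List.replicate k 1)) = pairProdA (a :: b :: t) + (k:Int)
    rw [pairSum, pairProdA, hmax, ih (fun x hx => hq x (by simp [hx]))]
    ring

-- on nonpositive elements the max rule is the product rule
lemma pairSum_nonpos (m : List Int) (hm : ∀ x ∈ m, x ≤ 0) : pairSum m = pairProdA m := by
  induction m using pairSum.induct with
  | case1 => rfl
  | case2 a => rfl
  | case3 a b t ih =>
    have ha : a ≤ 0 := hm a (by simp)
    have hb : b ≤ 0 := hm b (by simp)
    have hmax : max (a * b) (a + b) = a * b := max_eq_left (by nlinarith)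
    rw [pairSum, pairProdA, hmax, ih (fun x hx => hm x (by simp [hx]))]

-- sorting the ≥ 1 elements descending = sorting the > 1 elements descending, then the ones
lemma sorted_pos_split (Li : List Int) :
    PySem.List.sorted (Li.filter (fun x => 1 ≤ x)) (fun x => x) true
      = PySem.List.sorted (Li.filter (fun x => 1 < x)) (fun x => x) true
        ++ List.replicate (Li.count 1) 1 := by
  set q := PySem.List.sorted (Li.filter (fun x => 1 < x)) (fun x => x) true with hqdef
  -- elements of q are > 1
  have hq : ∀ x ∈ q, (1:Int) < x := by
    intro x hx
    rw [hqdef, PySem.List.mem_sorted] at hx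
    have := List.of_mem_filter hx
    simpa using this
  apply PySem.List.eq_of_perm_of_pairwise_le_of_injective (fun x : Int => -x) neg_injective
  · -- permutation: sorted(≥1) ~ filter(≥1) ~ filter(>1) ++ ones ~ q ++ ones
    refine (PySem.List.sorted_perm _ _ _).trans (List.Perm.trans ?_ (List.Perm.append_right _ (PySem.List.sorted_perm _ _ _).symm))
    have hsplit := List.filter_append_perm (fun x : Int => decide (1 < x)) (Li.filter (fun x => 1 ≤ x))
    have e1 : (Li.filter (fun x => 1 ≤ x)).filter (fun x : Int => decide (1 < x))
        = Li.filter (fun x => 1 < x) := by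
      rw [List.filter_filter]
      apply List.filter_congr
      intro x _
      by_cases h : (1:Int) < x <;> simp [h] <;> omega
    have e2 : (Li.filter (fun x => 1 ≤ x)).filter (fun x : Int => !decide (1 < x))
        = List.replicate (Li.count 1) 1 := by
      rw [List.filter_filter]
      have : ∀ x ∈ Li, ((!decide (1 < x)) && decide (1 ≤ x)) = decide (x = 1) := by
        intro x _
        by_cases h : x = (1:Int) <;> simp [h] <;> omega
      rw [List.filter_congr this, List.filter_eq]
    rw [e1, e2] at hsplit
    exact hsplit.symm
  · exact (PySem.List.sorted_pairwise_rev _ _).imp (by intro a b h; simpa using h)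
  · rw [List.pairwise_append]
    refine ⟨(PySem.List.sorted_pairwise_rev _ _).imp (by intro a b h; simpa using h), ?_, ?_⟩
    · rw [List.pairwise_replicate]
      right; rfl
    · intro x hx y hy
      have := hq x hx
      have : y = 1 := List.eq_of_mem_replicate hy
      omega

-- ===== VERDICT (by name: the statement is the Claim_ definition above) =====
theorem joyGo_spec : Claim_equal_joyGo := by
  intro N Li _
  unfold Spec_joyGo joyGo joyGo_alt
  rw [joyGo_partition Li 0 [] []]
  simp only [List.nil_append]
  rw [joyGoLoop_eq, joyGoLoop_eq, sorted_pos_split]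
  have h2 : ∀ x ∈ PySem.List.sorted (Li.filter (fun x => 1 < x)) (fun x => x) true, (2:Int) ≤ x := by
    intro x hx
    rw [PySem.List.mem_sorted] at hx
    have h1 : (1:Int) < x := by have := List.of_mem_filter hx; simpa using this
    omega
  have hm : ∀ x ∈ PySem.List.sorted (Li.filter (fun x => x ≤ 0)) (fun x => x) false, x ≤ (0:Int) := by
    intro x hx
    rw [PySem.List.mem_sorted] at hx
    have := List.of_mem_filter hx
    simpa using this
  rw [pairSum_append_ones _ h2, pairSum_nonpos _ hm]
  ring
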